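-- pv_equiv track=rewrite | github.com/felixmark/fgc | fgc_tools/libs/parity.py | parity_range
-- ===== SOURCE A (Python) =====
-- def parity_index(bits):
--     bit_index = 2
--     parity_location = [0]
--
--     while bit_index < len(bits):
--         parity_location.append(bit_index - 1)
--         bit_index = bit_index * 2
--     return parity_location
--
-- def parity_range(bits, interator):
--     result = []
--     next_bit = interator - 1
--     cicle = interator
--
--     for index, bit in enumerate(bits):
--         if index == next_bit:
--
--             if index not in parity_index(bits):
--                 result.append(index)
--             cicle -= 1
--
--             if cicle == 0:
--                 next_bit += interator + 1
--                 cicle = interator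
--             else:
--                 next_bit += 1
--     return result
-- ===== SOURCE B (Python) =====
-- def parity_range(bits, interator):
--     # One pass with a closed-form periodicity test; parity positions precomputed once.
--     if interator <= 0:
--         return []
--     n = len(bits)
--     parity = {0}
--     p = 2
--     while p < n:
--         parity.add(p - 1)
--         p *= 2
--     period = 2 * interator
--     return [i for i in range(n)
--             if (i - (interator - 1)) % period < interator and i not in parity]
-- ===== Notes on version B (the rewrite author's own statement) =====
-- stated objective: simpler
-- what changed: Replaced the next_bit/cicle state machine (which re-runs parity_index inside the loop) with a single comprehension using a closed-form periodicity test (i-(interator-1)) % (2*interator) < interator and a parity set precomputed once.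
import Mathlib
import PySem

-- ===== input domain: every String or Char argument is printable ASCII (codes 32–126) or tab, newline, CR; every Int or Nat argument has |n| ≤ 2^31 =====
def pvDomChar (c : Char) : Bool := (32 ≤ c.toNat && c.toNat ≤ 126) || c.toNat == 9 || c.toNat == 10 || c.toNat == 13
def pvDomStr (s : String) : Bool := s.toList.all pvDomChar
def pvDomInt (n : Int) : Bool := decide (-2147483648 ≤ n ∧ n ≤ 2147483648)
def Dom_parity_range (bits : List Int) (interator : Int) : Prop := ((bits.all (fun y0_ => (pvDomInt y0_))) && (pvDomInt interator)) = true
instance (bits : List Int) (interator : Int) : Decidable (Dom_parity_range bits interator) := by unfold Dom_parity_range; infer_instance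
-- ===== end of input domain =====

-- B replaces A's next_bit/cicle state machine by one pass with a closed-form periodicity
-- test and a parity set built once (objective: simpler).

-- ===== PORT A =====
-- while bit_index < len(bits): append bit_index-1; bit_index *= 2
-- (fuel = n only bounds the recursion: bit_index starts at 2 and doubles, so the loop
-- runs fewer than n times and the fuel is never exhausted)
def parity_index_loop (n fuel bit_index : Nat) (acc : List Int) : List Int :=
  match fuel with
  | 0 => acc
  | fuel + 1 =>
    if bit_index < n then
      parity_index_loop n fuel (bit_index * 2) (acc ++ [(bit_index : Int) - 1])
    else acc

def parity_index (bits : List Int) : List Int :=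
  parity_index_loop bits.length bits.length 2 [0]

-- the body of A's 'for index, bit in enumerate(bits)' loop, state (result, next_bit, cicle)
def parity_step (bits : List Int) (interator : Int)
    (st : List Int × Int × Int) (ib : Int × Int) : List Int × Int × Int :=
  if ib.1 = st.2.1 then
    let result := if ib.1 ∉ parity_index bits then st.1 ++ [ib.1] else st.1
    let cicle := st.2.2 - 1
    if cicle = 0 then (result, st.2.1 + interator + 1, interator)
    else (result, st.2.1 + 1, cicle)
  else st

def parity_range (bits : List Int) (interator : Int) : List Int :=
  ((PySem.List.enumerate bits).foldl (parity_step bits interator)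
    ([], interator - 1, interator)).1

-- ===== PORT B =====
-- while p < n: parity.add(p-1); p *= 2   (fuel = n bounds the recursion as above)
def parity_set_loop (n fuel p : Nat) (s : PySem.Set Int) : PySem.Set Int :=
  match fuel with
  | 0 => s
  | fuel + 1 =>
    if p < n then
      parity_set_loop n fuel (p * 2) (PySem.Set.add s ((p : Int) - 1))
    else s

def parity_range_alt (bits : List Int) (interator : Int) : List Int :=
  if interator ≤ 0 then []
  else
    let n := bits.length
    let parity := parity_set_loop n n 2 (PySem.Set.ofList [0])
    let period := 2 * interator
    ((List.range n).filter (fun (i : Nat) =>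
        decide (PySem.Int.mod ((i : Int) - (interator - 1)) period < interator) &&
        !(PySem.Set.contains parity (i : Int)))).map (fun i => (i : Int))

-- ===== PRECONDITION & SPEC =====
def Spec_parity_range (bits : List Int) (interator : Int) (out : List Int) : Prop := out = parity_range_alt bits interator
instance (bits : List Int) (interator : Int) (out : List Int) : Decidable (Spec_parity_range bits interator out) := by unfold Spec_parity_range; infer_instance

-- ===== CLAIM (what is proved, stated in full; the proofs are below) =====
def Claim_equal_parity_range : Prop := ∀ (bits : List Int) (interator : Int), Dom_parity_range bits interator → Spec_parity_range bits interator (parity_range bits interator)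

-- ===== LEMMAS AND PROOFS =====

-- the residue (i-(k-1)) mod 2k driving the state machine, and the canonical state at step i
def pvR (k : Int) (i : Nat) : Int := ((i : Int) - (k - 1)) % (2 * k)
def pvNb (k : Int) (i : Nat) : Int := if pvR k i < k then (i : Int) else (i : Int) + 2 * k - pvR k i
def pvC (k : Int) (i : Nat) : Int := if pvR k i < k then k - pvR k i else k

lemma pvR_bounds (k : Int) (hk : 0 < k) (i : Nat) : 0 ≤ pvR k i ∧ pvR k i < 2 * k := by
  unfold pvR
  exact ⟨Int.emod_nonneg _ (by omega), Int.emod_lt_of_pos _ (by omega)⟩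

lemma pvR_succ (k : Int) (hk : 0 < k) (i : Nat) :
    pvR k (i + 1) = if pvR k i = 2 * k - 1 then 0 else pvR k i + 1 := by
  have hb := pvR_bounds k hk i
  unfold pvR at *
  have h1 : ((i + 1 : Nat) : Int) - (k - 1) = ((i : Int) - (k - 1)) + 1 := by push_cast; ring
  rw [h1, Int.add_emod]
  have h2 : (1 : Int) % (2 * k) = 1 := Int.emod_eq_of_lt (by omega) (by omega)
  rw [h2]
  split_ifs with h
  · rw [h]; simp [show (2 * k - 1 + 1 : Int) = 2 * k by ring]
  · exact Int.emod_eq_of_lt (by omega) (by omega)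

lemma pvR_zero (k : Int) (hk : 0 < k) : pvNb k 0 = k - 1 ∧ pvC k 0 = k := by
  have hv : pvR k 0 = (k + 1) % (2 * k) := by
    unfold pvR
    have : ((0 : Nat) : Int) - (k - 1) = (k + 1) + (2 * k) * (-1) := by push_cast; ring
    rw [this, Int.add_mul_emod_self_left]
  by_cases hk1 : k = 1
  · have h0 : pvR k 0 = 0 := by rw [hv, hk1]; decide
    unfold pvNb pvC
    rw [h0, hk1]; norm_num
  · have h0 : pvR k 0 = k + 1 := by
      rw [hv]; exact Int.emod_eq_of_lt (by omega) (by omega)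
    unfold pvNb pvC
    rw [h0]
    have hn : ¬ (k + 1 < k) := by omega
    rw [if_neg hn, if_neg hn]
    constructor <;> omega

-- one step of A's loop from the canonical state
lemma step_canon (bits : List Int) (k : Int) (hk : 0 < k) (i : Nat) (res : List Int) (x : Int) :
    parity_step bits k (res, pvNb k i, pvC k i) ((i : Int), x) =
      ((if (decide (pvR k i < k) && !decide ((i : Int) ∈ parity_index bits)) = true
          then res ++ [(i : Int)] else res), pvNb k (i + 1), pvC k (i + 1)) := by
  have hb := pvR_bounds k hk i
  have hs := pvR_succ k hk i
  have hcast : ((i + 1 : Nat) : Int) = (i : Int) + 1 := by push_cast; ring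
  by_cases hlt : pvR k i < k
  · have hnb : pvNb k i = (i : Int) := by unfold pvNb; rw [if_pos hlt]
    have hc : pvC k i = k - pvR k i := by unfold pvC; rw [if_pos hlt]
    by_cases h1 : pvR k i = k - 1
    · have hr1 : pvR k (i + 1) = k := by rw [hs, if_neg (by omega), h1]; ring
      have hnb1 : pvNb k (i + 1) = (i : Int) + 1 + k := by
        unfold pvNb; rw [hr1, if_neg (by omega), hcast]; ring
      have hc1 : pvC k (i + 1) = k := by unfold pvC; rw [hr1, if_neg (by omega)]
      simp only [parity_step, hnb, hc, hnb1, hc1]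
      rw [if_pos trivial, if_pos (show k - pvR k i - 1 = 0 by omega)]
      simp only [Prod.mk.injEq]
      refine ⟨?_, by omega, trivial⟩
      by_cases hm : (i : Int) ∈ parity_index bits
      · simp [hm, hlt]
      · simp [hm, hlt]
    · have hr1 : pvR k (i + 1) = pvR k i + 1 := by rw [hs, if_neg (by omega)]
      have hnb1 : pvNb k (i + 1) = (i : Int) + 1 := by
        unfold pvNb; rw [hr1, if_pos (by omega), hcast]
      have hc1 : pvC k (i + 1) = k - (pvR k i + 1) := by
        unfold pvC; rw [hr1, if_pos (by omega)]
      simp only [parity_step, hnb, hc, hnb1, hc1]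
      rw [if_pos trivial, if_neg (show ¬ (k - pvR k i - 1 = 0) by omega)]
      simp only [Prod.mk.injEq]
      refine ⟨?_, trivial, by omega⟩
      by_cases hm : (i : Int) ∈ parity_index bits
      · simp [hm, hlt]
      · simp [hm, hlt]
  · have hnb : pvNb k i = (i : Int) + 2 * k - pvR k i := by unfold pvNb; rw [if_neg hlt]
    have hc : pvC k i = k := by unfold pvC; rw [if_neg hlt]
    have hne : ¬ ((i : Int) = pvNb k i) := by rw [hnb]; omega
    have hst : pvNb k (i + 1) = (i : Int) + 2 * k - pvR k i ∧ pvC k (i + 1) = k := by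
      by_cases h2 : pvR k i = 2 * k - 1
      · have hr1 : pvR k (i + 1) = 0 := by rw [hs, if_pos h2]
        unfold pvNb pvC
        rw [hr1, if_pos (by omega), if_pos (by omega), hcast, h2]
        constructor <;> omega
      · have hr1 : pvR k (i + 1) = pvR k i + 1 := by rw [hs, if_neg h2]
        unfold pvNb pvC
        rw [hr1, if_neg (by omega), if_neg (by omega), hcast]
        constructor <;> omega
    simp only [parity_step]
    rw [if_neg hne]
    simp only [Prod.mk.injEq]
    exact ⟨by simp [hlt], by rw [hst.1, hnb], by rw [hst.2, hc]⟩

lemma fold_main (bits : List Int) (k : Int) (hk : 0 < k) :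
    ∀ (xs : List Int) (s : Nat) (res : List Int),
      (PySem.List.enumerate xs (s : Int)).foldl (parity_step bits k) (res, pvNb k s, pvC k s) =
        (res ++ ((List.range' s xs.length).filter (fun i =>
            decide (pvR k i < k) && !decide ((i : Int) ∈ parity_index bits))).map
          (fun i => (i : Int)),
         pvNb k (s + xs.length), pvC k (s + xs.length)) := by
  intro xs
  induction xs with
  | nil => intro s res; simp [PySem.List.enumerate_nil]
  | cons x xs ih =>
    intro s res
    rw [PySem.List.enumerate_cons, List.foldl_cons, step_canon bits k hk s res x]
    have hcast : ((s : Int) + 1) = ((s + 1 : Nat) : Int) := by push_cast; ring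
    rw [hcast, ih (s + 1)]
    have harith : s + 1 + xs.length = s + (x :: xs).length := by simp; omega
    rw [harith, List.length_cons, List.range'_succ, List.filter_cons]
    by_cases hcond : (decide (pvR k s < k) && !decide ((s : Int) ∈ parity_index bits)) = true
    · simp [hcond]
    · simp [hcond]

lemma fold_nonpos (bits : List Int) (k : Int) :
    ∀ (xs : List Int) (s : Int) (res : List Int) (nb c : Int), nb < s →
      (PySem.List.enumerate xs s).foldl (parity_step bits k) (res, nb, c) = (res, nb, c) := by
  intro xs
  induction xs with
  | nil => intro s res nb c _; simp [PySem.List.enumerate_nil]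
  | cons x xs ih =>
    intro s res nb c h
    rw [PySem.List.enumerate_cons, List.foldl_cons]
    have hone : parity_step bits k (res, nb, c) (s, x) = (res, nb, c) := by
      simp only [parity_step]
      rw [if_neg (by omega)]
    rw [hone]
    exact ih (s + 1) res nb c (by omega)

lemma mem_loops (n : Nat) : ∀ (fuel p : Nat) (s : PySem.Set Int) (acc : List Int),
    (∀ y, y ∈ s ↔ y ∈ acc) →
      ∀ x, (x ∈ parity_set_loop n fuel p s ↔ x ∈ parity_index_loop n fuel p acc) := by
  intro fuel
  induction fuel with
  | zero => intro p s acc hsa x; exact hsa x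
  | succ fuel ih =>
    intro p s acc hsa x
    unfold parity_set_loop parity_index_loop
    by_cases hcond : p < n
    · rw [if_pos hcond, if_pos hcond]
      refine ih (p * 2) _ (acc ++ [(p : Int) - 1]) ?_ x
      intro y
      rw [PySem.Set.mem_add]
      simp only [List.mem_append, List.mem_singleton, hsa y]
    · rw [if_neg hcond, if_neg hcond]
      exact hsa x

-- ===== VERDICT (by name: the statement is the Claim_ definition above) =====
theorem parity_range_spec : Claim_equal_parity_range := by
  intro bits k _hdom
  unfold Spec_parity_range parity_range parity_range_alt
  by_cases hk : k ≤ 0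
  · rw [if_pos hk, fold_nonpos bits k bits 0 [] (k - 1) k (by omega)]
  · rw [if_neg hk]
    have hk' : 0 < k := by omega
    have h0 := pvR_zero k hk'
    rw [show ((k - 1 : Int), k) = (pvNb k 0, pvC k 0) by rw [h0.1, h0.2]]
    rw [show (0 : Int) = ((0 : Nat) : Int) by norm_num]
    rw [fold_main bits k hk' bits 0 []]
    simp only [List.nil_append]
    rw [← List.range_eq_range']
    have hfeq : List.filter (fun i => decide (pvR k i < k) && !decide ((i : Int) ∈ parity_index bits)) (List.range bits.length) =
        List.filter (fun (i : Nat) =>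
          decide (PySem.Int.mod ((i : Int) - (k - 1)) (2 * k) < k) &&
          !(PySem.Set.contains (parity_set_loop bits.length bits.length 2 (PySem.Set.ofList [0])) (i : Int)))
          (List.range bits.length) := by
      apply List.filter_congr
      intro i _hi
      have hmod : PySem.Int.mod ((i : Int) - (k - 1)) (2 * k) = pvR k i := by
        rw [PySem.Int.mod_eq_emod_of_pos (by omega)]; rfl
      have hmem : ∀ x, x ∈ parity_set_loop bits.length bits.length 2 (PySem.Set.ofList [0]) ↔
          x ∈ parity_index bits := by
        intro x
        unfold parity_index
        exact mem_loops _ _ _ _ [0] (by intro y; simp [PySem.Set.mem_ofList]) x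
      have hcont : PySem.Set.contains (parity_set_loop bits.length bits.length 2 (PySem.Set.ofList [0]))
          (i : Int) = decide ((i : Int) ∈ parity_index bits) := by
        rw [Bool.eq_iff_iff, PySem.Set.contains_iff, decide_eq_true_eq]
        exact hmem (i : Int)
      rw [hmod, hcont]
    rw [hfeq]
    norm_num
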